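-- pv_equiv track=rewrite | github.com/ishayankoo001/python-exercises | 5/solution.py | recEs5
-- ===== SOURCE A (Python) =====
-- def recEs5(sourceSet, resSet, k):
--     if(k == 1):
--         return resSet
--     else:
--         newSet = set()
--         for el1 in sourceSet:
--             for el2 in resSet:
--                 newSet.add(el1+el2)
--         return recEs5(sourceSet, newSet, k-1)
-- ===== SOURCE B (Python) =====
-- def recEs5(sourceSet, resSet, k):
--     # Iterative build-up: apply the Minkowski (concatenation) step k-1 times
--     # with one flat set comprehension per step, instead of A's recursion on k
--     # with nested loops adding into a set element by element.
--     res = resSet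
--     for _ in range(k - 1):
--         res = {x + y for x in sourceSet for y in res}
--     return res
-- ===== Notes on version B (the rewrite author's own statement) =====
-- stated objective: idiomatic
-- what changed: A's recursion on k with nested loops adding each concatenation into a set is replaced by an iterative range(k-1) loop whose step is a single flat set comprehension.
import Mathlib
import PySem

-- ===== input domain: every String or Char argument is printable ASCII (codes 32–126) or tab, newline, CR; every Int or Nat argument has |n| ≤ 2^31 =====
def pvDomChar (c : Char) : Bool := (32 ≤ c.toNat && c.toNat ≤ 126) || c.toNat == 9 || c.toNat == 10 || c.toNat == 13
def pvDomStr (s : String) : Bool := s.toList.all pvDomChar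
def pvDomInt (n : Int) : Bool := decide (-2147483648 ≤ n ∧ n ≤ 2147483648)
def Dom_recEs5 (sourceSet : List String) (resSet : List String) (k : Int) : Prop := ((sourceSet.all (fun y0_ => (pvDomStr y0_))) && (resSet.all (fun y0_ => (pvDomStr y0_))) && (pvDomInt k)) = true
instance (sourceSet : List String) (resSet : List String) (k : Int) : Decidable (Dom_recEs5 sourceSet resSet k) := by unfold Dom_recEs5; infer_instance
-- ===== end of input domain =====

-- B applies the same Minkowski-concatenation step iteratively (range loop) with one flat set
-- comprehension per step, instead of A's recursion on k with nested loops adding into a set.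

-- ===== PORT A =====
-- newSet = set(); for el1 in sourceSet: for el2 in resSet: newSet.add(el1+el2)
def recEs5Step (sourceSet resSet : List String) : List String :=
  sourceSet.foldl
    (fun ns el1 => resSet.foldl (fun ns2 el2 => PySem.Set.add ns2 (el1 ++ el2)) ns)
    PySem.Set.empty

-- A's recursion decrements k by 1 until k == 1; fuel (k-1).toNat makes it total
-- (Python diverges for k < 1 — excluded by Pre_).
def recEs5Go (sourceSet : List String) : Nat → List String → List String
  | 0, res => res
  | n+1, res => recEs5Go sourceSet n (recEs5Step sourceSet res)

def recEs5 (sourceSet : List String) (resSet : List String) (k : Int) : List String :=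
  recEs5Go sourceSet (k - 1).toNat resSet

-- ===== PORT B =====
-- res = {x + y for x in sourceSet for y in res}
def recEs5AltStep (sourceSet res : List String) : List String :=
  PySem.Set.ofList (sourceSet.flatMap (fun x => res.map (fun y => x ++ y)))

-- for _ in range(k - 1): res = step(res)
def recEs5_alt (sourceSet : List String) (resSet : List String) (k : Int) : List String :=
  (PySem.List.pyRange 0 (k - 1) 1).foldl (fun res _ => recEs5AltStep sourceSet res) resSet

-- ===== PRECONDITION & SPEC =====
-- Pre_ excludes k < 1, on which Python A recurses forever (RecursionError).
def Pre_recEs5 (sourceSet : List String) (resSet : List String) (k : Int) : Prop := 1 ≤ k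
instance (sourceSet : List String) (resSet : List String) (k : Int) : Decidable (Pre_recEs5 sourceSet resSet k) := by unfold Pre_recEs5; infer_instance
def pvWitness_recEs5 : List String × List String × Int := (["a", "b"], ["x"], 3)

def Spec_recEs5 (sourceSet : List String) (resSet : List String) (k : Int) (out : List String) : Prop := out = recEs5_alt sourceSet resSet k
instance (sourceSet : List String) (resSet : List String) (k : Int) (out : List String) : Decidable (Spec_recEs5 sourceSet resSet k out) := by unfold Spec_recEs5; infer_instance

-- ===== CLAIM (what is proved, stated in full; the proofs are below) =====
def Claim_equal_recEs5 : Prop := ∀ (sourceSet : List String) (resSet : List String) (k : Int), Dom_recEs5 sourceSet resSet k → Pre_recEs5 sourceSet resSet k → Spec_recEs5 sourceSet resSet k (recEs5 sourceSet resSet k)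

-- ===== LEMMAS AND PROOFS =====

-- one step: nested set.add loops = ordered dedup of the flat product list
theorem recEs5_step_eq (sourceSet res : List String) :
    recEs5Step sourceSet res = recEs5AltStep sourceSet res := by
  unfold recEs5Step recEs5AltStep
  rw [PySem.Set.ofList_eq_foldl]
  suffices h : ∀ (xs : List String) (init : List String),
      xs.foldl (fun ns el1 => res.foldl (fun ns2 el2 => PySem.Set.add ns2 (el1 ++ el2)) ns) init
        = (xs.flatMap (fun x => res.map (fun y => x ++ y))).foldl PySem.Set.add init from
    h sourceSet PySem.Set.empty
  intro xs
  induction xs with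
  | nil => intro init; rfl
  | cons x xs ih =>
      intro init
      simp only [List.flatMap_cons, List.foldl_append, List.foldl_cons, List.foldl_map, ih]

theorem recEs5_go_step_comm (sourceSet : List String) (n : Nat) (res : List String) :
    recEs5Go sourceSet n (recEs5Step sourceSet res)
      = recEs5Step sourceSet (recEs5Go sourceSet n res) := by
  induction n generalizing res with
  | zero => rfl
  | succ n ih => simpa [recEs5Go] using ih (recEs5Step sourceSet res)

theorem recEs5_go_eq_range (sourceSet : List String) (n : Nat) (res : List String) :
    recEs5Go sourceSet n res
      = (List.range n).foldl (fun r _ => recEs5AltStep sourceSet r) res := by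
  induction n generalizing res with
  | zero => rfl
  | succ n ih =>
      rw [List.range_succ, List.foldl_append]
      simp only [List.foldl_cons, List.foldl_nil]
      rw [← ih, recEs5Go, recEs5_go_step_comm, recEs5_step_eq]

-- ===== VERDICT (by name: the statement is the Claim_ definition above) =====
theorem recEs5_spec : Claim_equal_recEs5 := by
  intro sourceSet resSet k _ _
  unfold Spec_recEs5 recEs5 recEs5_alt
  rw [PySem.List.pyRange_one, List.foldl_map, recEs5_go_eq_range]
  norm_num
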